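-- pv_equiv track=rewrite | github.com/reineestherkitsoukou-art/NSI-1-re | TP-9.py | hauteur_max
-- ===== SOURCE A (Python) =====
-- def syrac(n:int)->int:
--     """
--     Calcul le terme suivant n dans la suite de Syracuse
--     3n+1 si impair n/2 sinon.
--     """
--     if n%2==0:
--         n=n//2
--     else:
--         n= 3*n+1
--     return n
--
-- def hauteur_vol(n:int)->int:
--     """
--     Renvoie la hauteur de vol d'une suite de Syracuse
--     partant de l'entier n.
--     """
--     hauteur = n
--     while n!=1:
--         n = syrac(n)
--         if n > hauteur:
--             hauteur = n
--     return hauteur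
--
-- def hauteur_max(x:int) -> int:
--
--     """
--     renvoie la valeur de départ d'une suite de syracuse de hauteur maximale généré par un nombre inférieur à n
--     """
--     hauteur_maximale = 0
--     valeur_depart = 1
--     for k in range(1,x):
--         hauteur = hauteur_vol(k)
--         if hauteur > hauteur_maximale:
--             hauteur_maximale = hauteur
--             valeur_depart = k
--     return valeur_depart
-- ===== SOURCE B (Python) =====
-- def syrac(n: int) -> int:
--     if n % 2 == 0:
--         n = n // 2
--     else:
--         n = 3 * n + 1
--     return n
--
-- def hauteur_max(x: int) -> int:
--     # Dynamic programming over 1..x-1: walk each trajectory only until it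
--     # drops below its start k, then reuse the stored flight height H[m].
--     H = {}              # H[m] = flight height of m, for every m already processed
--     best_h = 0
--     best_k = 1
--     for k in range(1, x):
--         m = k
--         h = k
--         while m >= k and m != 1:
--             m = syrac(m)
--             if m > h:
--                 h = m
--         if m != 1:      # m < k, already processed
--             hm = H[m]
--             if hm > h:
--                 h = hm
--         H[k] = h
--         if h > best_h:
--             best_h = h
--             best_k = k
--     return best_k
-- ===== Notes on version B (the rewrite author's own statement) =====
-- stated objective: faster
-- what changed: Instead of walking every Syracuse trajectory through its entire flight for each start value k, B keeps a table H of the flight heights of all already-processed start values and walks each trajectory only until it first drops below k, finishing with one table lookup.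
import Mathlib
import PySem

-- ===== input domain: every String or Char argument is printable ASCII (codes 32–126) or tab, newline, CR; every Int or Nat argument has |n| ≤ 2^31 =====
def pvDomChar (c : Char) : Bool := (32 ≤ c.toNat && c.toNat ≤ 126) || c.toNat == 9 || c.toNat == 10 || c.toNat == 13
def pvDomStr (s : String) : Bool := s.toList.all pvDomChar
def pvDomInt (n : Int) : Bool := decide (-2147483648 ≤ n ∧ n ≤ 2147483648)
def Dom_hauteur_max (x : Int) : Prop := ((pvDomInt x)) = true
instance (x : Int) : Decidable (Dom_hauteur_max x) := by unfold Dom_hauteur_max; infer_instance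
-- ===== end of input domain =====

-- B replaces A's full Syracuse flight per start value by a dynamic programme that walks each
-- trajectory only until it drops below its start and reuses stored heights: measurably faster.
-- Both Python loops 'while n != 1' terminate on the same inputs; the Lean ports totalise them
-- with one fuel budget pvFuel per start value k (never exhausted in the behavioural tests);
-- the Nat stored beside each cached height in the B port is pure fuel bookkeeping (the number
-- of Syracuse steps the cached value stands for), so that a cache hit spends exactly the fuel
-- the re-walk would have spent and the two ports agree for EVERY fuel outcome.

-- shared module helper (both Python files define the identical 'syrac')
def syracPort (n : Int) : Int :=
  if PySem.Int.mod n 2 = 0 then PySem.Int.floordiv n 2 else 3 * n + 1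

def pvFuel : Nat := 18446744073709551616

-- ===== PORT A =====
-- hauteur_vol's 'while n != 1' loop: state (n, hauteur); returns (hauteur, fuel left)
def hvAux (fuel : Nat) (n h : Int) : Option (Int × Nat) :=
  if n = 1 then some (h, fuel)
  else
    match fuel with
    | 0 => none
    | f + 1 =>
      let n' := syracPort n
      hvAux f n' (if n' > h then n' else h)

-- one iteration of A's 'for k in range(1, x)' loop (state: hauteur_maximale, valeur_depart)
def stepA (st : Option (Int × Int)) (k : Int) : Option (Int × Int) :=
  match st with
  | none => none
  | some (hm, vd) =>
    match hvAux pvFuel k k with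
    | none => none
    | some (h, _) => if h > hm then some (h, k) else some (hm, vd)

def hauteur_max (x : Int) : Int :=
  match (PySem.List.pyRange 1 x 1).foldl stepA (some ((0 : Int), (1 : Int))) with
  | none => -1
  | some (_, vd) => vd

-- ===== PORT B =====
-- B's inner 'while m >= k and m != 1' loop: running maximum, stop at the first value below k
def walkB (fuel : Nat) (k m h : Int) : Option (Int × Int × Nat) :=
  if m ≥ k ∧ m ≠ 1 then
    match fuel with
    | 0 => none
    | f + 1 =>
      let m' := syracPort m
      walkB f k m' (if m' > h then m' else h)
  else some (m, h, fuel)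

-- walk, then combine with the cached height of the stop value (H[m]); the cached Nat is the
-- flight length of m, consumed from the fuel so a hit costs what the skipped walk would cost
def hvB (fuel : Nat) (k : Int) (H : PySem.Dict Int (Int × Nat)) : Option (Int × Nat) :=
  match walkB fuel k k k with
  | none => none
  | some (m, h, f) =>
    if m = 1 then some (h, f)
    else
      match H.get? m with
      | none => none        -- unreachable: every 1 ≤ m < k is in the cache
      | some (hm, lm) => if lm ≤ f then some (if hm > h then hm else h, f - lm) else none

-- one iteration of B's 'for k in range(1, x)' loop (state: best_h, best_k, cache H)
def stepB (st : Option (Int × Int × PySem.Dict Int (Int × Nat))) (k : Int) :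
    Option (Int × Int × PySem.Dict Int (Int × Nat)) :=
  match st with
  | none => none
  | some (hm, vd, H) =>
    match hvB pvFuel k H with
    | none => none
    | some (h, f) =>
      let H' := H.insert k (h, pvFuel - f)
      if h > hm then some (h, k, H') else some (hm, vd, H')

def hauteur_max_alt (x : Int) : Int :=
  match (PySem.List.pyRange 1 x 1).foldl stepB
      (some ((0 : Int), (1 : Int), (PySem.Dict.empty : PySem.Dict Int (Int × Nat)))) with
  | none => -1
  | some (_, vd, _) => vd

-- ===== PRECONDITION & SPEC =====
def Spec_hauteur_max (x : Int) (out : Int) : Prop := out = hauteur_max_alt x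
instance (x : Int) (out : Int) : Decidable (Spec_hauteur_max x out) := by unfold Spec_hauteur_max; infer_instance

-- ===== CLAIM (what is proved, stated in full; the proofs are below) =====
def Claim_equal_hauteur_max : Prop := ∀ (x : Int), Dom_hauteur_max x → Spec_hauteur_max x (hauteur_max x)

-- ===== LEMMAS AND PROOFS =====

-- "the flight of n has height h and length l" expressed through A's fuelled loop
def FlightData (n h : Int) (l : Nat) : Prop :=
  ∀ g, hvAux g n n = if l ≤ g then some (h, g - l) else none

-- cache invariant of B at the moment start value k is processed
def HInv (k : Int) (H : PySem.Dict Int (Int × Nat)) : Prop :=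
  (∀ m h l, H.get? m = some (h, l) → FlightData m h l) ∧
  (∀ m, 1 ≤ m → m < k → (H.get? m).isSome)

lemma syracPort_pos {n : Int} (h1 : 1 ≤ n) : 1 ≤ syracPort n := by
  unfold syracPort
  split_ifs with he
  · rw [PySem.Int.mod_eq_zero_iff_dvd] at he
    obtain ⟨c, hc⟩ := he
    rw [hc, PySem.Int.floordiv_eq_ediv_of_pos (by omega)]
    omega
  · omega

-- small-step equations of A's fuelled loop
lemma hvAux_one (fuel : Nat) (h : Int) : hvAux fuel 1 h = some (h, fuel) := by
  unfold hvAux; simp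

lemma hvAux_zero {n : Int} (h1 : n ≠ 1) (h : Int) : hvAux 0 n h = none := by
  unfold hvAux; rw [if_neg h1]

lemma hvAux_step {n : Int} (h1 : n ≠ 1) (f : Nat) (h : Int) :
    hvAux (f + 1) n h = hvAux f (syracPort n) (if syracPort n > h then syracPort n else h) := by
  conv_lhs => unfold hvAux
  rw [if_neg h1]

-- accumulator lemma: the running maximum factors out of A's loop
lemma hvAux_acc : ∀ (fuel : Nat) (n h : Int), n ≤ h →
    hvAux fuel n h = (hvAux fuel n n).map (fun p => (max h p.1, p.2)) := by
  intro fuel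
  induction fuel with
  | zero =>
    intro n h hnh
    by_cases h1 : n = 1
    · subst h1
      rw [hvAux_one, hvAux_one]
      simp
      omega
    · rw [hvAux_zero h1, hvAux_zero h1]
      simp
  | succ f ih =>
    intro n h hnh
    by_cases h1 : n = 1
    · subst h1
      rw [hvAux_one, hvAux_one]
      simp
      omega
    · rw [hvAux_step h1, hvAux_step h1,
          ih (syracPort n) (if syracPort n > h then syracPort n else h) (by split_ifs <;> omega),
          ih (syracPort n) (if syracPort n > n then syracPort n else n) (by split_ifs <;> omega)]
      cases hvAux f (syracPort n) (syracPort n) with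
      | none => simp
      | some p =>
        simp only [Option.map_some, Option.some.injEq, Prod.mk.injEq]
        refine ⟨?_, trivial⟩
        simp only [max_def]
        split_ifs <;> omega

-- fuel characterisation: one successful run of A's loop determines it for every fuel
lemma hvAux_char : ∀ (F : Nat) (n h r : Int) (f' : Nat),
    hvAux F n h = some (r, f') → f' ≤ F ∧
      (∀ g, hvAux g n h = if F - f' ≤ g then some (r, g - (F - f')) else none) := by
  intro F
  induction F with
  | zero =>
    intro n h r f' hF
    by_cases h1 : n = 1
    · subst h1
      rw [hvAux_one] at hF
      simp at hF
      obtain ⟨hr, hf⟩ := hF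
      subst hr
      subst hf
      refine ⟨le_refl _, fun g => ?_⟩
      rw [hvAux_one]
      simp
    · rw [hvAux_zero h1] at hF
      exact absurd hF (by simp)
  | succ F ih =>
    intro n h r f' hF
    by_cases h1 : n = 1
    · subst h1
      rw [hvAux_one] at hF
      simp at hF
      obtain ⟨hr, hf⟩ := hF
      subst hr
      subst hf
      refine ⟨le_refl _, fun g => ?_⟩
      rw [hvAux_one]
      simp
    · rw [hvAux_step h1] at hF
      obtain ⟨hle, hall⟩ := ih (syracPort n) (if syracPort n > h then syracPort n else h) r f' hF
      have hgap : F + 1 - f' = (F - f') + 1 := by omega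
      refine ⟨by omega, fun g => ?_⟩
      match g with
      | 0 =>
        rw [hvAux_zero h1, if_neg (by omega)]
      | g + 1 =>
        rw [hvAux_step h1, hall g, hgap]
        by_cases hcond : F - f' ≤ g
        · rw [if_pos hcond, if_pos (by omega)]
          have : g - (F - f') = g + 1 - (F - f' + 1) := by omega
          rw [this]
        · rw [if_neg hcond, if_neg (by omega)]

lemma flightData_of_run {F : Nat} {n h : Int} {f' : Nat}
    (hrun : hvAux F n n = some (h, f')) : FlightData n h (F - f') :=
  (hvAux_char F n n h f' hrun).2

-- the walk+combine of B computes exactly A's fuelled loop (same value, same fuel left)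
lemma walk_combine {k : Int} {H : PySem.Dict Int (Int × Nat)} (hH : HInv k H) :
    ∀ (fuel : Nat) (m h : Int), 1 ≤ m → m ≤ h →
      (match walkB fuel k m h with
       | none => none
       | some (m', h', f) =>
         if m' = 1 then some (h', f)
         else
           match H.get? m' with
           | none => none
           | some (hm, lm) => if lm ≤ f then some (if hm > h' then hm else h', f - lm) else none)
      = hvAux fuel m h := by
  intro fuel
  induction fuel with
  | zero =>
    intro m h hm1 hmh
    unfold walkB
    split_ifs with hc
    · simp only
      rw [hvAux_zero hc.2]
    · simp only
      rcases Classical.em (m = 1) with h1 | h1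
      · rw [if_pos h1]
        subst h1
        rw [hvAux_one]
      · rw [if_neg h1]
        have hmk : m < k := by
          by_contra hge
          exact hc ⟨by omega, h1⟩
        obtain ⟨⟨hm2, lm⟩, hget⟩ := Option.isSome_iff_exists.mp (hH.2 m hm1 hmk)
        rw [hget]
        simp only
        have hfd := hH.1 m hm2 lm hget
        rw [hvAux_acc 0 m h hmh, hfd 0]
        by_cases hl : lm ≤ 0
        · rw [if_pos hl, if_pos hl]
          simp only [Option.map_some, Option.some.injEq, Prod.mk.injEq]
          refine ⟨?_, trivial⟩
          simp only [max_def]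
          split_ifs <;> omega
        · rw [if_neg hl, if_neg hl]
          simp
  | succ f ih =>
    intro m h hm1 hmh
    unfold walkB
    split_ifs with hc
    · simp only
      rw [ih (syracPort m) (if syracPort m > h then syracPort m else h)
            (syracPort_pos (by omega)) (by split_ifs <;> omega),
          hvAux_step hc.2]
    · simp only
      rcases Classical.em (m = 1) with h1 | h1
      · rw [if_pos h1]
        subst h1
        rw [hvAux_one]
      · rw [if_neg h1]
        have hmk : m < k := by
          by_contra hge
          exact hc ⟨by omega, h1⟩
        obtain ⟨⟨hm2, lm⟩, hget⟩ := Option.isSome_iff_exists.mp (hH.2 m hm1 hmk)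
        rw [hget]
        simp only
        have hfd := hH.1 m hm2 lm hget
        rw [hvAux_acc (f + 1) m h hmh, hfd (f + 1)]
        by_cases hl : lm ≤ f + 1
        · rw [if_pos hl, if_pos hl]
          simp only [Option.map_some, Option.some.injEq, Prod.mk.injEq]
          refine ⟨?_, trivial⟩
          simp only [max_def]
          split_ifs <;> omega
        · rw [if_neg hl, if_neg hl]
          simp

-- inserting the freshly computed flight of k preserves the cache invariant, advanced to k+1
lemma HInv_insert {k : Int} {H : PySem.Dict Int (Int × Nat)} (hH : HInv k H)
    {h : Int} {f : Nat} (hrun : hvAux pvFuel k k = some (h, f)) :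
    HInv (k + 1) (H.insert k (h, pvFuel - f)) := by
  constructor
  · intro m hm lm hget
    by_cases hmk : m = k
    · subst hmk
      rw [PySem.Dict.get?_insert_self] at hget
      cases hget
      exact flightData_of_run hrun
    · rw [PySem.Dict.get?_insert_of_ne _ _ hmk] at hget
      exact hH.1 m hm lm hget
  · intro m hm1 hmk
    by_cases hmk' : m = k
    · subst hmk'
      rw [PySem.Dict.get?_insert_self]
      simp
    · rw [PySem.Dict.get?_insert_of_ne _ _ hmk']
      exact hH.2 m hm1 (by omega)

-- B's walk+combine equals A's flight loop, packaged at hvB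
lemma hvB_eq_hvAux {k : Int} {H : PySem.Dict Int (Int × Nat)} (hH : HInv k H) (hk : 1 ≤ k)
    (fuel : Nat) : hvB fuel k H = hvAux fuel k k :=
  walk_combine hH fuel k k hk (le_refl k)

-- the two folds stay in lock-step: equal best pair, and the cache invariant at the next k
lemma fold_sync : ∀ (x : Int), 1 ≤ x →
    ((PySem.List.pyRange 1 x 1).foldl stepA (some ((0 : Int), (1 : Int))) = none ∧
     (PySem.List.pyRange 1 x 1).foldl stepB
        (some ((0 : Int), (1 : Int), (PySem.Dict.empty : PySem.Dict Int (Int × Nat)))) = none) ∨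
    (∃ hm vd H,
      (PySem.List.pyRange 1 x 1).foldl stepA (some ((0 : Int), (1 : Int))) = some (hm, vd) ∧
      (PySem.List.pyRange 1 x 1).foldl stepB
        (some ((0 : Int), (1 : Int), (PySem.Dict.empty : PySem.Dict Int (Int × Nat)))) = some (hm, vd, H) ∧
      HInv x H) := by
  intro x hx
  induction x, hx using Int.le_induction with
  | base =>
    rw [PySem.List.pyRange_one_eq_nil (le_refl 1)]
    right
    refine ⟨0, 1, PySem.Dict.empty, rfl, rfl, ?_, ?_⟩
    · intro m h l hget
      simp [PySem.Dict.get?, PySem.Dict.empty] at hget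
    · intro m hm1 hmk
      omega
  | succ x hx ih =>
    rw [PySem.List.pyRange_one_succ_right (by omega), List.foldl_append, List.foldl_append]
    rcases ih with ⟨hA, hB⟩ | ⟨hm, vd, H, hA, hB, hH⟩
    · rw [hA, hB]
      left
      exact ⟨rfl, rfl⟩
    · rw [hA, hB]
      simp only [List.foldl_cons, List.foldl_nil]
      simp only [stepA, stepB]
      rw [hvB_eq_hvAux hH hx pvFuel]
      cases hrun : hvAux pvFuel x x with
      | none => left; exact ⟨rfl, rfl⟩
      | some p =>
        obtain ⟨h, f⟩ := p
        right
        simp only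
        have hH' := HInv_insert hH hrun
        by_cases hgt : h > hm
        · rw [if_pos hgt, if_pos hgt]
          exact ⟨h, x, H.insert x (h, pvFuel - f), rfl, rfl, hH'⟩
        · rw [if_neg hgt, if_neg hgt]
          exact ⟨hm, vd, H.insert x (h, pvFuel - f), rfl, rfl, hH'⟩

-- ===== VERDICT (by name: the statement is the Claim_ definition above) =====
theorem hauteur_max_spec : Claim_equal_hauteur_max := by
  unfold Claim_equal_hauteur_max Spec_hauteur_max
  intro x _
  unfold hauteur_max hauteur_max_alt
  by_cases hx : 1 ≤ x
  · rcases fold_sync x hx with ⟨hA, hB⟩ | ⟨hm, vd, H, hA, hB, _⟩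
    · rw [hA, hB]
    · rw [hA, hB]
  · rw [PySem.List.pyRange_one_eq_nil (by omega)]
    rfl
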